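-- pv_equiv track=rewrite | github.com/Libotry/ms-mcp | skills/profiling_full_tool.py | _recommendations_from_step_trace
-- ===== SOURCE A (Python) =====
-- from typing import Any, Dict, List, Optional
--
-- def _recommendations_from_step_trace(result: Dict[str, Any]) -> List[str]:
--     """从 step_trace 结果生成建议。"""
--     recs: List[str] = []
--     for finding in result.get("findings", []):
--         ftype = finding.get("type", "")
--         if ftype == "high_free_ratio":
--             recs.append("设备空闲占比过高，增加并行任务或优化调度")
--         elif ftype == "low_overlap_ratio":
--             recs.append("通信计算重叠率低，优化通信调度时机")
--         elif ftype == "high_bubble_ratio":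
--             recs.append("流水线气泡比例过高，检查同步点和数据依赖")
--         elif ftype == "unstable_iteration":
--             recs.append("迭代耗时不稳定，检查数据加载和预处理流程")
--         elif ftype == "high_data_aug_ratio":
--             recs.append("数据增强占比过高，优化数据管道或增加预取")
--     if not recs:
--         recs.append("当前迭代执行无明显异常")
--     return recs
-- ===== SOURCE B (Python) =====
-- from typing import Any, Dict, List, Optional
--
-- _TABLE = {
--     "high_free_ratio": "设备空闲占比过高，增加并行任务或优化调度",
--     "low_overlap_ratio": "通信计算重叠率低，优化通信调度时机",
--     "high_bubble_ratio": "流水线气泡比例过高，检查同步点和数据依赖",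
--     "unstable_iteration": "迭代耗时不稳定，检查数据加载和预处理流程",
--     "high_data_aug_ratio": "数据增强占比过高，优化数据管道或增加预取",
-- }
--
-- def _go(findings: List[Dict[str, Any]]) -> List[str]:
--     """Recursive head/tail decomposition: build the list by consing onto the
--     recursively-computed tail (no accumulator, no imperative append loop)."""
--     if not findings:
--         return []
--     msg = _TABLE.get(findings[0].get("type", ""))
--     rest = _go(findings[1:])
--     return rest if msg is None else [msg] + rest
--
-- def _recommendations_from_step_trace(result: Dict[str, Any]) -> List[str]:
--     return _go(result.get("findings", [])) or ["当前迭代执行无明显异常"]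
-- ===== Notes on version B (the rewrite author's own statement) =====
-- stated objective: alternative
-- what changed: Replaces A's imperative accumulator loop over an if/elif branch chain with a recursive head/tail helper that builds the output by consing onto the recursively computed tail, using a lookup table instead of branches and 'or' for the empty default.
import Mathlib
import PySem

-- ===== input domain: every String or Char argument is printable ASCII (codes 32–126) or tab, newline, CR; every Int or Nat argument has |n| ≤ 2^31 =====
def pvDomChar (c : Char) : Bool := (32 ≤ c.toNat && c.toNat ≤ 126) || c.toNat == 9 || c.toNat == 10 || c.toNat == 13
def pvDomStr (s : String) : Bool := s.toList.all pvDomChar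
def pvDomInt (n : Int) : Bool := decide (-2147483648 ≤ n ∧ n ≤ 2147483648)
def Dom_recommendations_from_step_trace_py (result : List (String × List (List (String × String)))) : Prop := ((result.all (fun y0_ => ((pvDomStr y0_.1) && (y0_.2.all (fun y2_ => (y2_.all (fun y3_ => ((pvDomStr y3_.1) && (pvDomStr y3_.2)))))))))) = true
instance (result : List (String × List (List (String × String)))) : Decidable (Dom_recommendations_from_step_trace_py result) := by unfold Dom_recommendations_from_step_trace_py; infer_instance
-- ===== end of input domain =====

-- B replaces A's imperative accumulator loop over an if/elif chain with a recursive
-- head/tail helper consing onto the recursive tail via a table lookup; objective: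
-- alternative decomposition, same O(n) cost.

-- ===== PORT A =====
-- literal transliteration: loop over findings, if/elif chain appending to recs
def recommendations_from_step_trace_py (result : List (String × List (List (String × String)))) : List String :=
  let recs : List String :=
    ((PySem.Dict.mk result).getD "findings" []).foldl (fun recs finding =>
      let ftype := (PySem.Dict.mk finding).getD "type" ""
      if ftype = "high_free_ratio" then recs ++ ["设备空闲占比过高，增加并行任务或优化调度"]
      else if ftype = "low_overlap_ratio" then recs ++ ["通信计算重叠率低，优化通信调度时机"]
      else if ftype = "high_bubble_ratio" then recs ++ ["流水线气泡比例过高，检查同步点和数据依赖"]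
      else if ftype = "unstable_iteration" then recs ++ ["迭代耗时不稳定，检查数据加载和预处理流程"]
      else if ftype = "high_data_aug_ratio" then recs ++ ["数据增强占比过高，优化数据管道或增加预取"]
      else recs) []
  if recs = [] then ["当前迭代执行无明显异常"] else recs

-- ===== PORT B =====
def recTable : PySem.Dict String String := PySem.Dict.mk
  [("high_free_ratio", "设备空闲占比过高，增加并行任务或优化调度"),
   ("low_overlap_ratio", "通信计算重叠率低，优化通信调度时机"),
   ("high_bubble_ratio", "流水线气泡比例过高，检查同步点和数据依赖"),
   ("unstable_iteration", "迭代耗时不稳定，检查数据加载和预处理流程"),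
   ("high_data_aug_ratio", "数据增强占比过高，优化数据管道或增加预取")]

-- _go: recursive head/tail helper, conses the looked-up message onto the tail
def recGo : List (List (String × String)) → List String
  | [] => []
  | finding :: fs =>
    let msg := recTable.get? ((PySem.Dict.mk finding).getD "type" "")
    let rest := recGo fs
    match msg with
    | none => rest
    | some m => [m] ++ rest

def recommendations_from_step_trace_py_alt (result : List (String × List (List (String × String)))) : List String :=
  let recs := recGo ((PySem.Dict.mk result).getD "findings" [])
  if recs = [] then ["当前迭代执行无明显异常"] else recs

-- ===== PRECONDITION & SPEC =====
def Spec_recommendations_from_step_trace_py (result : List (String × List (List (String × String)))) (out : List String) : Prop := out = recommendations_from_step_trace_py_alt result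
instance (result : List (String × List (List (String × String)))) (out : List String) : Decidable (Spec_recommendations_from_step_trace_py result out) := by unfold Spec_recommendations_from_step_trace_py; infer_instance

-- ===== CLAIM (what is proved, stated in full; the proofs are below) =====
def Claim_equal_recommendations_from_step_trace_py : Prop := ∀ (result : List (String × List (List (String × String)))), Dom_recommendations_from_step_trace_py result → Spec_recommendations_from_step_trace_py result (recommendations_from_step_trace_py result)

-- ===== LEMMAS AND PROOFS =====

-- each step of A's branch chain appends exactly what B's table lookup yields
theorem step_eq (acc : List String) (finding : List (String × String)) :
    (let ftype := (PySem.Dict.mk finding).getD "type" ""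
      if ftype = "high_free_ratio" then acc ++ ["设备空闲占比过高，增加并行任务或优化调度"]
      else if ftype = "low_overlap_ratio" then acc ++ ["通信计算重叠率低，优化通信调度时机"]
      else if ftype = "high_bubble_ratio" then acc ++ ["流水线气泡比例过高，检查同步点和数据依赖"]
      else if ftype = "unstable_iteration" then acc ++ ["迭代耗时不稳定，检查数据加载和预处理流程"]
      else if ftype = "high_data_aug_ratio" then acc ++ ["数据增强占比过高，优化数据管道或增加预取"]
      else acc)
    = acc ++ (recTable.get? ((PySem.Dict.mk finding).getD "type" "")).toList := by
  generalize (PySem.Dict.mk finding).getD "type" "" = t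
  by_cases h1 : t = "high_free_ratio" <;>
  by_cases h2 : t = "low_overlap_ratio" <;>
  by_cases h3 : t = "high_bubble_ratio" <;>
  by_cases h4 : t = "unstable_iteration" <;>
  by_cases h5 : t = "high_data_aug_ratio" <;>
    simp_all [recTable, PySem.Dict.get?];
    exact ⟨Ne.symm h1, Ne.symm h2, Ne.symm h3, Ne.symm h4, Ne.symm h5⟩

-- A's accumulator fold equals acc ++ B's recursive result
theorem foldl_eq_recGo (fs : List (List (String × String))) (acc : List String) :
    fs.foldl (fun recs finding =>
      let ftype := (PySem.Dict.mk finding).getD "type" ""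
      if ftype = "high_free_ratio" then recs ++ ["设备空闲占比过高，增加并行任务或优化调度"]
      else if ftype = "low_overlap_ratio" then recs ++ ["通信计算重叠率低，优化通信调度时机"]
      else if ftype = "high_bubble_ratio" then recs ++ ["流水线气泡比例过高，检查同步点和数据依赖"]
      else if ftype = "unstable_iteration" then recs ++ ["迭代耗时不稳定，检查数据加载和预处理流程"]
      else if ftype = "high_data_aug_ratio" then recs ++ ["数据增强占比过高，优化数据管道或增加预取"]
      else recs) acc
    = acc ++ recGo fs := by
  induction fs generalizing acc with
  | nil => simp [recGo]
  | cons f rest ih =>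
      simp only [List.foldl_cons]
      rw [step_eq]
      cases h : recTable.get? ((PySem.Dict.mk f).getD "type" "") <;>
        simp [recGo, ih, h]

-- ===== VERDICT (by name: the statement is the Claim_ definition above) =====
theorem recommendations_from_step_trace_py_spec : Claim_equal_recommendations_from_step_trace_py := by
  intro result _
  unfold Spec_recommendations_from_step_trace_py recommendations_from_step_trace_py recommendations_from_step_trace_py_alt
  rw [foldl_eq_recGo]
  simp
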